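-- pv_equiv track=rewrite | github.com/s0duku/ProxyFuzzer | PFuzz/Utils.py | PFuzzSplitStrCommon
-- ===== SOURCE A (Python) =====
-- def PFuzzBuildMatrix(row,line):
--     return [[0 for k in range(line)] for l in range(row)]
--
-- def PFuzzFindCommonSubstr(X,Y):
--     m = len(X)
--     n = len(Y)
--
--     LCSuff = PFuzzBuildMatrix(m+1,n+1)
--
--     result = 0
--     sublen = 0
--
--     for i in range(m + 1):
--         for j in range(n + 1):
--             if (i == 0 or j == 0):
--                 LCSuff[i][j] = 0
--             elif (X[i-1] == Y[j-1]):
--                 LCSuff[i][j] = LCSuff[i-1][j-1] + 1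
--                 if LCSuff[i][j] > result:
--                     result = LCSuff[i][j]
--                     sublen = i
--             else:
--                 LCSuff[i][j] = 0
--     return X[:sublen][-result:]
--
-- def PFuzzSplitStrCommon(X,Y):
--     if not X or not Y:
--         return []
--     splitF = []
--     splitB = []
--
--     comStr = PFuzzFindCommonSubstr(X,Y)
--
--     if comStr:
--         Xf = X[:X.index(comStr)]
--         Xb = X[X.index(comStr)+len(comStr):]
--         Yf = Y[:Y.index(comStr)]
--         Yb = Y[Y.index(comStr)+len(comStr):]
--
--         splitF += PFuzzSplitStrCommon(Xf,Yf)
--         splitB += PFuzzSplitStrCommon(Xb,Yb)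
--
--         return splitF + [comStr] + splitB
--
--     return []
-- ===== SOURCE B (Python) =====
-- def _pfuzz_lcs(X, Y):
--     # Longest common substring by scanning each alignment offset (diagonal) once,
--     # keeping the longest run; ties broken by the smallest ending index in X.
--     m, n = len(X), len(Y)
--     best = 0
--     end = 0
--     for d in range(1 - n, m):
--         i = d if d > 0 else 0
--         j = i - d
--         run = 0
--         while i < m and j < n:
--             run = run + 1 if X[i] == Y[j] else 0
--             if run > best or (run == best and i + 1 < end):
--                 best, end = run, i + 1
--             i += 1
--             j += 1
--     return X[end - best:end]
--
-- def PFuzzSplitStrCommon(X, Y):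
--     if not X or not Y:
--         return []
--     c = _pfuzz_lcs(X, Y)
--     if not c:
--         return []
--     i = X.find(c)
--     j = Y.find(c)
--     return (PFuzzSplitStrCommon(X[:i], Y[:j])
--             + [c]
--             + PFuzzSplitStrCommon(X[i + len(c):], Y[j + len(c):]))
-- ===== Notes on version B (the rewrite author's own statement) =====
-- stated objective: alternative
-- what changed: The longest-common-substring search replaces A's (m+1)x(n+1) dynamic-programming matrix with a single-pass scan of each alignment offset (diagonal) that keeps only a current run length and the best (length, end-in-X) pair, using O(1) extra memory instead of O(m*n); the recursion then splits at the first occurrence like A.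
import Mathlib
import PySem

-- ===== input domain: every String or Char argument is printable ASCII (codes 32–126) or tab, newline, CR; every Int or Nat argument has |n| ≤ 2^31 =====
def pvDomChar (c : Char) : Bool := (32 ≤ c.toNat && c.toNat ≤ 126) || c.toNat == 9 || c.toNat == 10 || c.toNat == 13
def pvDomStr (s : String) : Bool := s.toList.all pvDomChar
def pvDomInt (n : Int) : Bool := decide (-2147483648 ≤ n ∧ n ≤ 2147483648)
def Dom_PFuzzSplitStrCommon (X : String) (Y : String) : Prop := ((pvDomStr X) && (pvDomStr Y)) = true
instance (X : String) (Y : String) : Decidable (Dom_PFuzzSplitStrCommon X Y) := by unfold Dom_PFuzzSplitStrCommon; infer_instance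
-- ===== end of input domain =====

-- B replaces A's (m+1)x(n+1) DP matrix for the longest-common-substring search by a per-diagonal
-- run scan with O(1) extra state (objective: alternative algorithm, same O(m*n) time).

-- ===== PORT A =====
def PFuzzBuildMatrix (row : Int) (line : Int) : List (List Int) :=
  (PySem.List.pyRange 0 row 1).map (fun _ => (PySem.List.pyRange 0 line 1).map (fun _ => (0 : Int)))

def PFuzzFindCommonSubstr (X : String) (Y : String) : String :=
  let m := PySem.Str.len X
  let n := PySem.Str.len Y
  let LCSuff := PFuzzBuildMatrix (m + 1) (n + 1)
  let st :=
    (PySem.List.pyRange 0 (m + 1) 1).foldl (fun st i =>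
      (PySem.List.pyRange 0 (n + 1) 1).foldl
        (fun (st : List (List Int) × Int × Int) j =>
          let M := st.1
          let result := st.2.1
          let sublen := st.2.2
          if i = 0 ∨ j = 0 then
            -- LCSuff[i][j] = 0  (list assignment; i, j ≥ 0 and in range, so set/getD are exact)
            (M.set i.toNat ((M.getD i.toNat []).set j.toNat 0), result, sublen)
          else if PySem.Str.pyGet? X (i - 1) = PySem.Str.pyGet? Y (j - 1) then
            -- v = LCSuff[i-1][j-1] + 1 (indices ≥ 0 and in range, so getD is exact)
            let v := (M.getD (i - 1).toNat []).getD (j - 1).toNat 0 + 1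
            let M' := M.set i.toNat ((M.getD i.toNat []).set j.toNat v)
            if v > result then (M', v, i) else (M', result, sublen)
          else
            (M.set i.toNat ((M.getD i.toNat []).set j.toNat 0), result, sublen))
        st)
      (LCSuff, 0, 0)
  -- return X[:sublen][-result:]
  PySem.Str.slice (PySem.Str.slice X none (some st.2.2)) (some (-st.2.1)) none

-- the recursion, with ample fuel (each recursive call strictly shortens X, so |X|+1 levels suffice)
def PFuzzSplitStrCommonGo : Nat → String → String → List String
  | 0, _, _ => []
  | fuel + 1, X, Y =>
    if X.toList = [] ∨ Y.toList = [] then []          -- if not X or not Y: return []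
    else
      let comStr := PFuzzFindCommonSubstr X Y
      if comStr.toList ≠ [] then
        -- X.index(comStr) / Y.index(comStr): exact as find, since comStr occurs in X and in Y here
        let idx := PySem.Str.find X comStr
        let Xf := PySem.Str.slice X none (some idx)
        let Xb := PySem.Str.slice X (some (idx + PySem.Str.len comStr)) none
        let jdx := PySem.Str.find Y comStr
        let Yf := PySem.Str.slice Y none (some jdx)
        let Yb := PySem.Str.slice Y (some (jdx + PySem.Str.len comStr)) none
        PFuzzSplitStrCommonGo fuel Xf Yf ++ [comStr] ++ PFuzzSplitStrCommonGo fuel Xb Yb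
      else []

def PFuzzSplitStrCommon (X : String) (Y : String) : List String :=
  PFuzzSplitStrCommonGo (X.toList.length + 1) X Y

-- ===== PORT B =====
-- the while loop of _pfuzz_lcs: walk one diagonal, extending the current run
def pvAltRun (x y : List Char) (i j : Nat) (run best en : Nat) : Nat × Nat :=
  if h : i < x.length ∧ j < y.length then
    let run' := if x[i]'h.1 = y[j]'h.2 then run + 1 else 0
    let s' := if run' > best ∨ (run' = best ∧ i + 1 < en) then (run', i + 1) else (best, en)
    pvAltRun x y (i + 1) (j + 1) run' s'.1 s'.2
  else (best, en)
termination_by x.length - i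

def pvAltLcs (X : String) (Y : String) : String :=
  let x := X.toList
  let y := Y.toList
  let st :=
    (PySem.List.pyRange (1 - (y.length : Int)) (x.length : Int) 1).foldl
      (fun (st : Nat × Nat) d =>
        let i : Nat := (max d 0).toNat            -- i = d if d > 0 else 0  (≥ 0)
        let j : Nat := ((i : Int) - d).toNat      -- j = i - d              (≥ 0)
        pvAltRun x y i j 0 st.1 st.2)
      (0, 0)
  -- return X[end - best:end]
  String.ofList ((x.drop (st.2 - st.1)).take (st.2 - (st.2 - st.1)))

def PFuzzSplitStrCommon_altGo : Nat → String → String → List String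
  | 0, _, _ => []
  | fuel + 1, X, Y =>
    if X.toList = [] ∨ Y.toList = [] then []
    else
      let c := pvAltLcs X Y
      if c.toList = [] then []
      else
        let i := PySem.Str.find X c
        let j := PySem.Str.find Y c
        PFuzzSplitStrCommon_altGo fuel (PySem.Str.slice X none (some i)) (PySem.Str.slice Y none (some j))
          ++ [c] ++
          PFuzzSplitStrCommon_altGo fuel (PySem.Str.slice X (some (i + PySem.Str.len c)) none)
            (PySem.Str.slice Y (some (j + PySem.Str.len c)) none)

def PFuzzSplitStrCommon_alt (X : String) (Y : String) : List String :=
  PFuzzSplitStrCommon_altGo (X.toList.length + 1) X Y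

-- ===== PRECONDITION & SPEC =====
def Spec_PFuzzSplitStrCommon (X : String) (Y : String) (out : List String) : Prop := out = PFuzzSplitStrCommon_alt X Y
instance (X : String) (Y : String) (out : List String) : Decidable (Spec_PFuzzSplitStrCommon X Y out) := by unfold Spec_PFuzzSplitStrCommon; infer_instance

-- ===== CLAIM (what is proved, stated in full; the proofs are below) =====
def Claim_equal_PFuzzSplitStrCommon : Prop := ∀ (X : String) (Y : String), Dom_PFuzzSplitStrCommon X Y → Spec_PFuzzSplitStrCommon X Y (PFuzzSplitStrCommon X Y)

-- ===== LEMMAS AND PROOFS =====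

-- g: length of the longest common suffix of x[:i] and y[:j]
def pvG (x y : List Char) : Nat → Nat → Nat
  | 0, _ => 0
  | _ + 1, 0 => 0
  | i + 1, j + 1 =>
    if i < x.length ∧ j < y.length ∧ x.getD i ' ' = y.getD j ' ' then pvG x y i j + 1 else 0

def pvOrd (a b : Nat × Nat) : Prop := a.1 < b.1 ∨ (a.1 = b.1 ∧ b.2 ≤ a.2)

def pvUpdA (s c : Nat × Nat) : Nat × Nat := if c.1 > s.1 then c else s
def pvUpdB (s c : Nat × Nat) : Nat × Nat := if c.1 > s.1 ∨ (c.1 = s.1 ∧ c.2 < s.2) then c else s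

theorem pvOrd_refl (a : Nat × Nat) : pvOrd a a := by unfold pvOrd; omega

theorem pvOrd_trans {a b c : Nat × Nat} (h1 : pvOrd a b) (h2 : pvOrd b c) : pvOrd a c := by
  unfold pvOrd at *; omega

theorem pvOrd_antisymm {a b : Nat × Nat} (h1 : pvOrd a b) (h2 : pvOrd b a) : a = b := by
  unfold pvOrd at *
  have : a.1 = b.1 ∧ a.2 = b.2 := by omega
  exact Prod.ext this.1 this.2

theorem pvFoldB_mem (L : List (Nat × Nat)) : ∀ s, L.foldl pvUpdB s = s ∨ L.foldl pvUpdB s ∈ L := by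
  induction L with
  | nil => intro s; left; rfl
  | cons c L ih =>
    intro s
    rcases ih (pvUpdB s c) with h | h
    · rw [List.foldl_cons, h]
      unfold pvUpdB
      split
      · right; exact List.mem_cons_self
      · left; rfl
    · right; exact List.mem_cons_of_mem _ h

theorem pvOrd_updB_left (s c : Nat × Nat) : pvOrd s (pvUpdB s c) := by
  unfold pvUpdB; split
  · unfold pvOrd; omega
  · exact pvOrd_refl s

theorem pvOrd_updB_right (s c : Nat × Nat) : pvOrd c (pvUpdB s c) := by
  unfold pvUpdB; split
  · exact pvOrd_refl c
  · unfold pvOrd; omega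

theorem pvFoldB_ub (L : List (Nat × Nat)) :
    ∀ s, pvOrd s (L.foldl pvUpdB s) ∧ ∀ c ∈ L, pvOrd c (L.foldl pvUpdB s) := by
  induction L with
  | nil => intro s; exact ⟨pvOrd_refl s, by simp⟩
  | cons a L ih =>
    intro s
    rw [List.foldl_cons]
    refine ⟨pvOrd_trans (pvOrd_updB_left s a) (ih (pvUpdB s a)).1, ?_⟩
    intro c hc
    rcases List.mem_cons.mp hc with rfl | hc
    · exact pvOrd_trans (pvOrd_updB_right s c) (ih (pvUpdB s c)).1
    · exact (ih (pvUpdB s a)).2 c hc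

theorem pvFoldB_zero (L : List (Nat × Nat)) :
    ∀ s : Nat × Nat, (s.1 = 0 → s.2 = 0) →
      ((L.foldl pvUpdB s).1 = 0 → (L.foldl pvUpdB s).2 = 0) := by
  induction L with
  | nil => intro s h; exact h
  | cons c L ih =>
    intro s h
    rw [List.foldl_cons]
    refine ih _ ?_
    unfold pvUpdB; split
    · intro h1; omega
    · exact h

theorem pvFoldA_eq_foldB (L : List (Nat × Nat)) :
    ∀ s, (∀ c ∈ L, s.2 ≤ c.2) → L.Pairwise (fun a b => a.2 ≤ b.2) →
      L.foldl pvUpdA s = L.foldl pvUpdB s := by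
  induction L with
  | nil => intro s _ _; rfl
  | cons c L ih =>
    intro s hle hp
    rw [List.foldl_cons, List.foldl_cons]
    have hsc : s.2 ≤ c.2 := hle c List.mem_cons_self
    have hstep : pvUpdA s c = pvUpdB s c := by
      unfold pvUpdA pvUpdB
      by_cases h : c.1 > s.1
      · rw [if_pos h, if_pos (Or.inl h)]
      · rw [if_neg h, if_neg (by omega)]
    rw [hstep]
    refine ih (pvUpdB s c) ?_ (List.Pairwise.of_cons hp)
    intro a ha
    unfold pvUpdB; split
    · exact (List.pairwise_cons.mp hp).1 a ha
    · exact hle a (List.mem_cons_of_mem _ ha)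

def pvMaxProp (x y : List Char) (r : Nat × Nat) : Prop :=
  (r.1 = 0 → r = (0, 0)) ∧
  (r = (0, 0) ∨ ∃ i j, i < x.length ∧ j < y.length ∧ r = (pvG x y (i + 1) (j + 1), i + 1)) ∧
  (∀ i j, i < x.length → j < y.length → pvOrd (pvG x y (i + 1) (j + 1), i + 1) r)

theorem pvMaxProp_ord {x y : List Char} {r r' : Nat × Nat}
    (h : pvMaxProp x y r) (h' : pvMaxProp x y r') : pvOrd r r' := by
  rcases h.2.1 with h0 | ⟨i, j, hi, hj, rfl⟩
  · subst h0
    rcases h'.2.1 with h0' | ⟨i, j, hi, hj, rfl⟩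
    · subst h0'; exact pvOrd_refl _
    · by_cases hz : pvG x y (i + 1) (j + 1) = 0
      · have := h'.1 (by simpa using hz)
        rw [this]; exact pvOrd_refl _
      · unfold pvOrd; left; simpa using Nat.pos_of_ne_zero hz
  · exact h'.2.2 i j hi hj

theorem pvMaxProp_unique {x y : List Char} {r r' : Nat × Nat}
    (h : pvMaxProp x y r) (h' : pvMaxProp x y r') : r = r' :=
  pvOrd_antisymm (pvMaxProp_ord h h') (pvMaxProp_ord h' h)

theorem pvG_le (x y : List Char) : ∀ i j, pvG x y i j ≤ i ∧ pvG x y i j ≤ j := by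
  intro i
  induction i with
  | zero => intro j; simp [pvG]
  | succ i ih =>
    intro j
    cases j with
    | zero => simp [pvG]
    | succ j =>
      unfold pvG; split
      · have := ih j; omega
      · omega

theorem pvG_pos_shape {x y : List Char} {i j : Nat} (h : 0 < pvG x y i j) :
    ∃ i' j', i = i' + 1 ∧ j = j' + 1 ∧ i' < x.length ∧ j' < y.length := by
  match i, j with
  | 0, j => simp [pvG] at h
  | i + 1, 0 => simp [pvG] at h
  | i + 1, j + 1 =>
    refine ⟨i, j, rfl, rfl, ?_, ?_⟩ <;>
    · unfold pvG at h; split at h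
      · omega
      · omega

theorem pvG_succ (x y : List Char) (i j : Nat) (hi : i < x.length) (hj : j < y.length) :
    pvG x y (i + 1) (j + 1) = if x[i] = y[j] then pvG x y i j + 1 else 0 := by
  show (if i < x.length ∧ j < y.length ∧ x.getD i ' ' = y.getD j ' ' then pvG x y i j + 1 else 0) = _
  have hx : x.getD i ' ' = x[i] := List.getD_eq_getElem x ' ' hi
  have hy : y.getD j ' ' = y[j] := List.getD_eq_getElem y ' ' hj
  rw [hx, hy]
  by_cases h : x[i] = y[j]
  · rw [if_pos ⟨hi, hj, h⟩, if_pos h]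
  · rw [if_neg (by tauto), if_neg h]

def pvCndAt (x y : List Char) (i j : Nat) : Option (Nat × Nat) :=
  if 0 < pvG x y i j then some (pvG x y i j, i) else none

def pvRc (x y : List Char) (i t : Nat) : List (Nat × Nat) := (List.range t).filterMap (pvCndAt x y i)

def pvCands (x y : List Char) (K : Nat) : List (Nat × Nat) :=
  (List.range K).flatMap (fun i => pvRc x y i (y.length + 1))

theorem mem_pvRc {x y : List Char} {i t : Nat} {c : Nat × Nat} :
    c ∈ pvRc x y i t ↔ ∃ j < t, 0 < pvG x y i j ∧ c = (pvG x y i j, i) := by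
  unfold pvRc pvCndAt
  simp only [List.mem_filterMap, List.mem_range]
  constructor
  · rintro ⟨j, hj, hc⟩
    split at hc
    · exact ⟨j, hj, by assumption, (Option.some_inj.mp hc).symm⟩
    · simp at hc
  · rintro ⟨j, hj, hg, rfl⟩
    exact ⟨j, hj, by rw [if_pos hg]⟩

theorem mem_pvCands {x y : List Char} {K : Nat} {c : Nat × Nat} :
    c ∈ pvCands x y K ↔ ∃ i < K, ∃ j < y.length + 1, 0 < pvG x y i j ∧ c = (pvG x y i j, i) := by
  unfold pvCands
  simp only [List.mem_flatMap, List.mem_range, mem_pvRc]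

theorem snd_mem_pvRc {x y : List Char} {i t : Nat} {c : Nat × Nat} (h : c ∈ pvRc x y i t) :
    c.2 = i := by
  rcases mem_pvRc.mp h with ⟨j, _, _, rfl⟩; rfl

theorem pairwise_pvCands (x y : List Char) (K : Nat) :
    (pvCands x y K).Pairwise (fun a b => a.2 ≤ b.2) := by
  induction K with
  | zero => simp [pvCands]
  | succ K ih =>
    unfold pvCands at *
    rw [List.range_succ, List.flatMap_append, List.pairwise_append]
    refine ⟨ih, ?_, ?_⟩
    · simp only [List.flatMap_cons, List.flatMap_nil, List.append_nil]
      refine List.pairwise_of_forall_mem_list ?_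
      intro a ha b hb; rw [snd_mem_pvRc ha, snd_mem_pvRc hb]
    · intro a ha b hb
      simp only [List.flatMap_cons, List.flatMap_nil, List.append_nil] at hb
      rcases List.mem_flatMap.mp ha with ⟨i, hi, hai⟩
      rw [snd_mem_pvRc hai, snd_mem_pvRc hb]
      exact Nat.le_of_lt (List.mem_range.mp hi)

def pvDCands (x y : List Char) (i j run : Nat) : List (Nat × Nat) :=
  if h : i < x.length ∧ j < y.length then
    ((if x[i]'h.1 = y[j]'h.2 then run + 1 else 0), i + 1) ::
      pvDCands x y (i + 1) (j + 1) (if x[i]'h.1 = y[j]'h.2 then run + 1 else 0)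
  else []
termination_by x.length - i

theorem pvAltRun_eq_foldB (x y : List Char) :
    ∀ i j run best en, pvAltRun x y i j run best en =
      (pvDCands x y i j run).foldl pvUpdB (best, en) := by
  intro i
  induction hn : x.length - i using Nat.strong_induction_on generalizing i with
  | _ n ih =>
    intro j run best en
    rw [pvAltRun, pvDCands]
    by_cases h : i < x.length ∧ j < y.length
    · rw [dif_pos h, dif_pos h, List.foldl_cons]
      have hlt : x.length - (i + 1) < n := by omega
      rw [ih _ hlt (i+1) rfl]
      simp only [pvUpdB]
    · rw [dif_neg h, dif_neg h]; rfl

theorem mem_pvDCands (x y : List Char) :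
    ∀ i j (c : Nat × Nat),
      (c ∈ pvDCands x y i j (pvG x y i j) ↔
        ∃ k, i + k < x.length ∧ j + k < y.length ∧
          c = (pvG x y (i + k + 1) (j + k + 1), i + k + 1)) := by
  intro i
  induction hn : x.length - i using Nat.strong_induction_on generalizing i with
  | _ n ih =>
    intro j c
    rw [pvDCands]
    by_cases h : i < x.length ∧ j < y.length
    · rw [dif_pos h]
      have hg : (if x[i]'h.1 = y[j]'h.2 then pvG x y i j + 1 else 0) = pvG x y (i + 1) (j + 1) :=
        (pvG_succ x y i j h.1 h.2).symm
      rw [hg]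
      have hlt : x.length - (i + 1) < n := by omega
      rw [List.mem_cons, ih _ hlt (i + 1) rfl (j + 1) c]
      constructor
      · rintro (rfl | ⟨k, hk1, hk2, rfl⟩)
        · exact ⟨0, by simpa using h.1, by simpa using h.2, by simp⟩
        · exact ⟨k + 1, by omega, by omega, by rw [show i + (k+1) = i + 1 + k by omega, show j + (k+1) = j + 1 + k by omega]⟩
      · rintro ⟨k, hk1, hk2, rfl⟩
        cases k with
        | zero => left; simp
        | succ k =>
          right
          exact ⟨k, by omega, by omega, by rw [show i + 1 + k = i + (k+1) by omega, show j + 1 + k = j + (k+1) by omega]⟩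
    · rw [dif_neg h]
      simp only [List.not_mem_nil, false_iff]
      rintro ⟨k, hk1, hk2, _⟩
      exact h ⟨by omega, by omega⟩

theorem pvG_zero_left (x y : List Char) (j : Nat) : pvG x y 0 j = 0 := rfl

theorem pvG_zero_right (x y : List Char) (i : Nat) : pvG x y i 0 = 0 := by
  cases i <;> rfl

def pvLB (x y : List Char) : List (Nat × Nat) :=
  (PySem.List.pyRange (1 - (y.length : Int)) (x.length : Int) 1).flatMap
    (fun d => pvDCands x y (max d 0).toNat ((((max d 0).toNat : Nat) : Int) - d).toNat 0)

theorem mem_pvLB {x y : List Char} {c : Nat × Nat} :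
    c ∈ pvLB x y ↔ ∃ i j, i < x.length ∧ j < y.length ∧ c = (pvG x y (i + 1) (j + 1), i + 1) := by
  unfold pvLB
  rw [List.mem_flatMap]
  constructor
  · rintro ⟨d, hd, hc⟩
    rw [PySem.List.mem_pyRange_one] at hd
    set i0 : Nat := (max d 0).toNat with hi0
    set j0 : Nat := (((i0 : Nat) : Int) - d).toNat with hj0
    have hrun : (0 : Nat) = pvG x y i0 j0 := by
      by_cases hd0 : 0 ≤ d
      · have : j0 = 0 := by omega
        rw [this, pvG_zero_right]
      · have : i0 = 0 := by omega
        rw [this, pvG_zero_left]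
    rw [hrun] at hc
    rcases (mem_pvDCands x y i0 j0 c).mp hc with ⟨k, hk1, hk2, rfl⟩
    exact ⟨i0 + k, j0 + k, hk1, hk2, rfl⟩
  · rintro ⟨i, j, hi, hj, rfl⟩
    refine ⟨(i : Int) - (j : Int), ?_, ?_⟩
    · rw [PySem.List.mem_pyRange_one]; omega
    · set d : Int := (i : Int) - (j : Int) with hd
      set i0 : Nat := (max d 0).toNat with hi0
      set j0 : Nat := (((i0 : Nat) : Int) - d).toNat with hj0
      have hrun : (0 : Nat) = pvG x y i0 j0 := by
        by_cases hd0 : 0 ≤ d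
        · have : j0 = 0 := by omega
          rw [this, pvG_zero_right]
        · have : i0 = 0 := by omega
          rw [this, pvG_zero_left]
      rw [hrun]
      refine (mem_pvDCands x y i0 j0 _).mpr ⟨min i j, by omega, by omega, ?_⟩
      have h1 : i0 + min i j = i := by omega
      have h2 : j0 + min i j = j := by omega
      rw [h1, h2]

theorem pvMaxProp_LB (x y : List Char) :
    pvMaxProp x y ((pvLB x y).foldl pvUpdB (0, 0)) := by
  set r := (pvLB x y).foldl pvUpdB (0, 0) with hr
  have hzero : r.1 = 0 → r = (0, 0) := by
    intro h1
    have h2 := pvFoldB_zero (pvLB x y) (0, 0) (fun _ => rfl) h1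
    exact Prod.ext h1 h2
  refine ⟨hzero, ?_, ?_⟩
  · rcases pvFoldB_mem (pvLB x y) (0, 0) with h | h
    · left; exact h
    · right; exact mem_pvLB.mp h
  · intro i j hi hj
    exact (pvFoldB_ub (pvLB x y) (0, 0)).2 _ (mem_pvLB.mpr ⟨i, j, hi, hj, rfl⟩)

theorem pvMaxProp_cands (x y : List Char) :
    pvMaxProp x y ((pvCands x y (x.length + 1)).foldl pvUpdA (0, 0)) := by
  rw [pvFoldA_eq_foldB _ _ (fun c _ => Nat.zero_le _) (pairwise_pvCands x y _)]
  set L := pvCands x y (x.length + 1) with hL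
  set r := L.foldl pvUpdB (0, 0) with hr
  have hmem : r = (0, 0) ∨ r ∈ L := pvFoldB_mem L (0, 0)
  have hcell : r = (0, 0) ∨ ∃ i j, i < x.length ∧ j < y.length ∧
      r = (pvG x y (i + 1) (j + 1), i + 1) := by
    rcases hmem with h | h
    · left; exact h
    · right
      rcases mem_pvCands.mp h with ⟨i, hi, j, hj, hg, hc⟩
      rcases pvG_pos_shape hg with ⟨i', j', rfl, rfl, hi', hj'⟩
      exact ⟨i', j', hi', hj', hc⟩
  have hzero : r.1 = 0 → r = (0, 0) := by
    intro h1
    have h2 := pvFoldB_zero L (0, 0) (fun _ => rfl) h1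
    exact Prod.ext h1 h2
  refine ⟨hzero, hcell, ?_⟩
  intro i j hi hj
  by_cases hg : 0 < pvG x y (i + 1) (j + 1)
  · refine (pvFoldB_ub L (0, 0)).2 _ (mem_pvCands.mpr ⟨i + 1, by omega, j + 1, by omega, hg, rfl⟩)
  · have hg0 : pvG x y (i + 1) (j + 1) = 0 := by omega
    rcases Nat.eq_zero_or_pos r.1 with h0 | hpos
    · rw [hzero h0, hg0]; right; exact ⟨rfl, by omega⟩
    · rw [hg0]; left; exact hpos

def pvBuildM (x y : List Char) (i j : Nat) : List (List Int) :=
  (List.range (x.length + 1)).map (fun r =>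
    (List.range (y.length + 1)).map (fun c =>
      if r < i ∨ (r = i ∧ c < j) then (pvG x y r c : Int) else 0))

theorem pvBuildM_row {x y : List Char} {i j r : Nat} (hr : r < x.length + 1) :
    (pvBuildM x y i j).getD r [] =
      (List.range (y.length + 1)).map (fun c =>
        if r < i ∨ (r = i ∧ c < j) then (pvG x y r c : Int) else 0) := by
  unfold pvBuildM
  rw [List.getD_eq_getElem _ _ (by simpa using hr)]
  simp

theorem pvBuildM_get {x y : List Char} {i j r c : Nat}
    (hr : r < x.length + 1) (hc : c < y.length + 1) :
    ((pvBuildM x y i j).getD r []).getD c 0 =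
      if r < i ∨ (r = i ∧ c < j) then (pvG x y r c : Int) else 0 := by
  rw [pvBuildM_row hr, List.getD_eq_getElem _ _ (by simpa using hc)]
  simp

theorem pvBuildM_set {x y : List Char} {i j : Nat}
    (hi : i < x.length + 1) (hj : j < y.length + 1) :
    (pvBuildM x y i j).set i (((pvBuildM x y i j).getD i []).set j (pvG x y i j : Int)) =
      pvBuildM x y i (j + 1) := by
  rw [pvBuildM_row hi]
  unfold pvBuildM
  refine List.ext_getElem (by simp) ?_
  intro r h1 h2
  rw [List.getElem_set]
  by_cases hri : i = r
  · rw [if_pos hri]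
    subst hri
    simp only [List.getElem_map, List.getElem_range]
    refine List.ext_getElem (by simp) ?_
    intro c hc1 hc2
    rw [List.getElem_set]
    have hcn : c < y.length + 1 := by simpa using hc2
    by_cases hcj : j = c
    · rw [if_pos hcj]
      subst hcj
      simp only [List.getElem_map, List.getElem_range, true_and]
      rw [if_pos (Or.inr (by omega))]
    · rw [if_neg hcj]
      simp only [List.getElem_map, List.getElem_range, true_and]
      by_cases hcc : c < j
      · rw [if_pos (Or.inr hcc), if_pos (Or.inr (by omega))]
      · rw [if_neg (by omega), if_neg (by omega)]
  · rw [if_neg hri]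
    simp only [List.getElem_map, List.getElem_range]
    refine List.map_congr_left ?_
    intro c hcmem
    have hrr : r < i ∨ (r = i ∧ c < j) ↔ (r < i ∨ (r = i ∧ c < j + 1)) := by
      constructor
      · rintro (h | ⟨rfl, h⟩)
        · exact Or.inl h
        · exact absurd rfl hri
      · rintro (h | ⟨rfl, h⟩)
        · exact Or.inl h
        · exact absurd rfl hri
    by_cases hcc : r < i ∨ (r = i ∧ c < j)
    · rw [if_pos hcc, if_pos (hrr.mp hcc)]
    · rw [if_neg hcc, if_neg (fun h => hcc (hrr.mpr h))]

theorem pvBuildM_rowEnd (x y : List Char) (i : Nat) :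
    pvBuildM x y i (y.length + 1) = pvBuildM x y (i + 1) 0 := by
  unfold pvBuildM
  refine List.map_congr_left ?_
  intro r _
  refine List.map_congr_left ?_
  intro c hc
  have hcn : c < y.length + 1 := List.mem_range.mp hc
  by_cases h : r < i ∨ (r = i ∧ c < y.length + 1)
  · rw [if_pos h, if_pos (by omega)]
  · rw [if_neg h, if_neg (by omega)]

theorem pvRc_succ (x y : List Char) (i t : Nat) :
    pvRc x y i (t + 1) = pvRc x y i t ++ (pvCndAt x y i t).toList := by
  unfold pvRc
  rw [List.range_succ, List.filterMap_append]
  cases h : pvCndAt x y i t <;> simp [h]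

theorem pvCands_succ (x y : List Char) (K : Nat) :
    pvCands x y (K + 1) = pvCands x y K ++ pvRc x y K (y.length + 1) := by
  unfold pvCands
  rw [List.range_succ, List.flatMap_append]
  simp

def pvInnerBody (X Y : String) (i : Int) (st : List (List Int) × Int × Int) (j : Int) :
    List (List Int) × Int × Int :=
  let M := st.1
  let result := st.2.1
  let sublen := st.2.2
  if i = 0 ∨ j = 0 then
    (M.set i.toNat ((M.getD i.toNat []).set j.toNat 0), result, sublen)
  else if PySem.Str.pyGet? X (i - 1) = PySem.Str.pyGet? Y (j - 1) then
    let v := (M.getD (i - 1).toNat []).getD (j - 1).toNat 0 + 1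
    let M' := M.set i.toNat ((M.getD i.toNat []).set j.toNat v)
    if v > result then (M', v, i) else (M', result, sublen)
  else
    (M.set i.toNat ((M.getD i.toNat []).set j.toNat 0), result, sublen)

theorem pvCellStep (X Y : String) (iN t : Nat)
    (hi : iN ≤ X.toList.length) (ht : t ≤ Y.toList.length) (p : Nat × Nat) :
    pvInnerBody X Y (iN : Int) (pvBuildM X.toList Y.toList iN t, ((p.1 : Int), (p.2 : Int))) (t : Int)
      = (pvBuildM X.toList Y.toList iN (t + 1),
         (((pvCndAt X.toList Y.toList iN t).toList.foldl pvUpdA p).1 : Int),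
         (((pvCndAt X.toList Y.toList iN t).toList.foldl pvUpdA p).2 : Int)) := by
  set x := X.toList with hx
  set y := Y.toList with hy
  have hset := @pvBuildM_set x y iN t (by omega) (by omega)
  by_cases h0 : iN = 0 ∨ t = 0
  · have hg : pvG x y iN t = 0 := by
      rcases h0 with rfl | rfl
      · exact pvG_zero_left x y t
      · exact pvG_zero_right x y iN
    have hcnd : pvCndAt x y iN t = none := by unfold pvCndAt; rw [if_neg (by omega)]
    simp only [pvInnerBody, hcnd, Option.toList_none, List.foldl_nil]
    rw [if_pos (by exact_mod_cast h0)]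
    simp only [Int.toNat_natCast]
    rw [show (0 : Int) = ((pvG x y iN t : Nat) : Int) by rw [hg]; rfl, hset]
  · push_neg at h0
    obtain ⟨hi1, ht1⟩ := h0
    have hi' : iN - 1 < x.length := by omega
    have ht' : t - 1 < y.length := by omega
    have hii : iN = (iN - 1) + 1 := by omega
    have htt : t = (t - 1) + 1 := by omega
    have hci : ((iN : Int) - 1) = (((iN - 1 : Nat) : Nat) : Int) := by omega
    have hct : ((t : Int) - 1) = (((t - 1 : Nat) : Nat) : Int) := by omega
    have hgetx : PySem.Str.pyGet? X ((iN : Int) - 1) = some (x[iN - 1]'hi') := by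
      rw [hci, PySem.Str.pyGet?_natCast, ← hx, List.getElem?_eq_getElem hi']
    have hgety : PySem.Str.pyGet? Y ((t : Int) - 1) = some (y[t - 1]'ht') := by
      rw [hct, PySem.Str.pyGet?_natCast, ← hy, List.getElem?_eq_getElem ht']
    have hread : ((pvBuildM x y iN t).getD ((iN : Int) - 1).toNat []).getD ((t : Int) - 1).toNat 0
        = (pvG x y (iN - 1) (t - 1) : Int) := by
      rw [hci, hct]
      simp only [Int.toNat_natCast]
      rw [pvBuildM_get (by omega) (by omega), if_pos (Or.inl (by omega))]
    by_cases hch : x[iN - 1]'hi' = y[t - 1]'ht'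
    · have hgsucc : pvG x y iN t = pvG x y (iN - 1) (t - 1) + 1 := by
        conv_lhs => rw [hii, htt]
        exact (by rw [pvG_succ x y _ _ hi' ht', if_pos hch] : pvG x y ((iN-1)+1) ((t-1)+1) = pvG x y (iN-1) (t-1) + 1)
      have hgpos : 0 < pvG x y iN t := by omega
      have hcnd : pvCndAt x y iN t = some (pvG x y iN t, iN) := by
        unfold pvCndAt; rw [if_pos hgpos]
      simp only [pvInnerBody]
      rw [if_neg (by push_neg; constructor <;> (intro hh; exact absurd (by exact_mod_cast hh) (by omega)))]
      rw [if_pos (by rw [hgetx, hgety, hch])]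
      rw [hread]
      have hv : (pvG x y (iN - 1) (t - 1) : Int) + 1 = ((pvG x y iN t : Nat) : Int) := by
        rw [hgsucc]; push_cast; ring
      rw [hv]
      simp only [Int.toNat_natCast]
      rw [hset]
      rw [hcnd]
      simp only [Option.toList_some, List.foldl_cons, List.foldl_nil]
      unfold pvUpdA
      by_cases hgt : pvG x y iN t > p.1
      · rw [if_pos (by exact_mod_cast hgt), if_pos hgt]
      · rw [if_neg (by exact_mod_cast hgt), if_neg hgt]
    · have hg : pvG x y iN t = 0 := by
        conv_lhs => rw [hii, htt]
        exact (by rw [pvG_succ x y _ _ hi' ht', if_neg hch] : pvG x y ((iN-1)+1) ((t-1)+1) = 0)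
      have hcnd : pvCndAt x y iN t = none := by unfold pvCndAt; rw [if_neg (by omega)]
      simp only [pvInnerBody, hcnd, Option.toList_none, List.foldl_nil]
      rw [if_neg (by push_neg; constructor <;> (intro hh; exact absurd (by exact_mod_cast hh) (by omega)))]
      rw [if_neg (by rw [hgetx, hgety]; simp [hch])]
      simp only [Int.toNat_natCast]
      rw [show (0 : Int) = ((pvG x y iN t : Nat) : Int) by rw [hg]; rfl, hset]

theorem pvInnerFold (X Y : String) (iN : Nat) (hi : iN ≤ X.toList.length) :
    ∀ t, t ≤ Y.toList.length + 1 → ∀ (p : Nat × Nat),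
      (List.range t).foldl (fun st (k : Nat) => pvInnerBody X Y (iN : Int) st (k : Int))
          (pvBuildM X.toList Y.toList iN 0, ((p.1 : Int), (p.2 : Int)))
        = (pvBuildM X.toList Y.toList iN t,
           (((pvRc X.toList Y.toList iN t).foldl pvUpdA p).1 : Int),
           (((pvRc X.toList Y.toList iN t).foldl pvUpdA p).2 : Int)) := by
  intro t
  induction t with
  | zero =>
    intro _ p
    simp [pvRc]
  | succ t ih =>
    intro ht p
    rw [List.range_succ, List.foldl_append, ih (by omega) p, List.foldl_cons, List.foldl_nil]
    rw [pvCellStep X Y iN t hi (by omega) ((pvRc X.toList Y.toList iN t).foldl pvUpdA p)]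
    rw [pvRc_succ, List.foldl_append]

theorem pvOuterFold (X Y : String) :
    ∀ K, K ≤ X.toList.length + 1 →
      (List.range K).foldl
          (fun st (k : Nat) => (List.range (Y.toList.length + 1)).foldl
             (fun st2 (k2 : Nat) => pvInnerBody X Y (k : Int) st2 (k2 : Int)) st)
          (pvBuildM X.toList Y.toList 0 0, ((0 : Int), (0 : Int)))
        = (pvBuildM X.toList Y.toList K 0,
           (((pvCands X.toList Y.toList K).foldl pvUpdA (0, 0)).1 : Int),
           (((pvCands X.toList Y.toList K).foldl pvUpdA (0, 0)).2 : Int)) := by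
  intro K
  induction K with
  | zero =>
    intro _
    simp [pvCands]
  | succ K ih =>
    intro hK
    rw [show List.range (K + 1) = List.range K ++ [K] from List.range_succ]
    rw [List.foldl_append, ih (by omega), List.foldl_cons, List.foldl_nil]
    rw [pvInnerFold X Y K (by omega) (Y.toList.length + 1) (by omega)
      ((pvCands X.toList Y.toList K).foldl pvUpdA (0, 0))]
    rw [pvBuildM_rowEnd, pvCands_succ, List.foldl_append]

theorem pvInitM (X Y : String) :
    PFuzzBuildMatrix ((X.toList.length : Int) + 1) ((Y.toList.length : Int) + 1)
      = pvBuildM X.toList Y.toList 0 0 := by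
  unfold PFuzzBuildMatrix pvBuildM
  rw [show ((X.toList.length : Int) + 1) = ((X.toList.length + 1 : Nat) : Int) by push_cast; ring,
      show ((Y.toList.length : Int) + 1) = ((Y.toList.length + 1 : Nat) : Int) by push_cast; ring,
      PySem.List.pyRange_zero_natCast, PySem.List.pyRange_zero_natCast]
  refine List.ext_getElem (by simp) ?_
  intro r h1 h2
  simp only [List.getElem_map, List.getElem_range]
  refine List.ext_getElem (by simp) ?_
  intro c hc1 hc2
  simp only [List.getElem_map, List.getElem_range]
  rw [if_neg (by omega)]

theorem pvA_char (X Y : String) :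
    PFuzzFindCommonSubstr X Y =
      PySem.Str.slice
        (PySem.Str.slice X none
          (some ((((pvCands X.toList Y.toList (X.toList.length + 1)).foldl pvUpdA (0, 0)).2 : Int))))
        (some (-(((pvCands X.toList Y.toList (X.toList.length + 1)).foldl pvUpdA (0, 0)).1 : Int))) none := by
  have h0 : PFuzzFindCommonSubstr X Y =
      (let st := (PySem.List.pyRange 0 ((PySem.Str.len X) + 1) 1).foldl
        (fun st i => (PySem.List.pyRange 0 ((PySem.Str.len Y) + 1) 1).foldl
          (fun st2 j => pvInnerBody X Y i st2 j) st)
        (PFuzzBuildMatrix ((PySem.Str.len X) + 1) ((PySem.Str.len Y) + 1), 0, 0)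
       PySem.Str.slice (PySem.Str.slice X none (some st.2.2)) (some (-st.2.1)) none) := rfl
  rw [h0]
  simp only [PySem.Str.len_eq]
  rw [show ((X.toList.length : Int) + 1) = ((X.toList.length + 1 : Nat) : Int) by push_cast; ring,
      show ((Y.toList.length : Int) + 1) = ((Y.toList.length + 1 : Nat) : Int) by push_cast; ring,
      PySem.List.pyRange_zero_natCast, PySem.List.pyRange_zero_natCast]
  rw [List.foldl_map]
  simp only [List.foldl_map]
  rw [show PFuzzBuildMatrix (((X.toList.length + 1 : Nat) : Int)) (((Y.toList.length + 1 : Nat) : Int))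
      = pvBuildM X.toList Y.toList 0 0 from by
    rw [show (((X.toList.length + 1 : Nat)) : Int) = ((X.toList.length : Int) + 1) by push_cast; ring,
        show (((Y.toList.length + 1 : Nat)) : Int) = ((Y.toList.length : Int) + 1) by push_cast; ring]
    exact pvInitM X Y]
  rw [pvOuterFold X Y (X.toList.length + 1) le_rfl]



theorem pvB_char (X Y : String) :
    pvAltLcs X Y =
      String.ofList ((X.toList.drop (((pvLB X.toList Y.toList).foldl pvUpdB (0, 0)).2
            - ((pvLB X.toList Y.toList).foldl pvUpdB (0, 0)).1)).take
          (((pvLB X.toList Y.toList).foldl pvUpdB (0, 0)).2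
            - (((pvLB X.toList Y.toList).foldl pvUpdB (0, 0)).2
              - ((pvLB X.toList Y.toList).foldl pvUpdB (0, 0)).1))) := by
  unfold pvAltLcs
  simp only [pvAltRun_eq_foldB, Prod.mk.eta]
  rw [← List.foldl_flatMap]
  rfl

theorem pvSliceEq (X : String) (r : Nat × Nat) (h1 : r.1 = 0 → r = (0, 0))
    (_hle : r.1 ≤ r.2) (hm : r.2 ≤ X.toList.length) :
    PySem.Str.slice (PySem.Str.slice X none (some (r.2 : Int))) (some (-(r.1 : Int))) none
      = String.ofList ((X.toList.drop (r.2 - r.1)).take (r.2 - (r.2 - r.1))) := by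
  rw [← String.toList_inj]
  simp only [PySem.Str.toList_slice, PySem.Chars.slice_eq_listSlice, String.toList_ofList]
  rcases Nat.eq_zero_or_pos r.1 with h0 | hpos
  · have : r = (0, 0) := h1 h0
    rw [this]
    simp [PySem.List.slice_to]
  · rw [PySem.List.slice_to_natCast]
    rw [PySem.List.slice_from_neg_natCast _ r.1 hpos]
    have hlen : (X.toList.take r.2).length = r.2 := by
      rw [List.length_take]; omega
    rw [hlen, List.drop_take]

theorem pv_main : ∀ (X Y : String), PFuzzFindCommonSubstr X Y = pvAltLcs X Y := by
  intro X Y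
  have hAB : (pvCands X.toList Y.toList (X.toList.length + 1)).foldl pvUpdA (0, 0)
      = (pvLB X.toList Y.toList).foldl pvUpdB (0, 0) :=
    pvMaxProp_unique (pvMaxProp_cands X.toList Y.toList) (pvMaxProp_LB X.toList Y.toList)
  have hMP := pvMaxProp_LB X.toList Y.toList
  set r := (pvLB X.toList Y.toList).foldl pvUpdB (0, 0) with hr
  have hbounds : r.1 ≤ r.2 ∧ r.2 ≤ X.toList.length := by
    rcases hMP.2.1 with h | ⟨i, j, hi, hj, hcell⟩
    · rw [h]; exact ⟨le_rfl, Nat.zero_le _⟩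
    · rw [hcell]
      exact ⟨(pvG_le X.toList Y.toList (i + 1) (j + 1)).1, by omega⟩
  rw [pvA_char X Y, pvB_char X Y, hAB]
  exact pvSliceEq X r hMP.1 hbounds.1 hbounds.2


theorem pv_go : ∀ (fuel : Nat) (X Y : String), PFuzzSplitStrCommonGo fuel X Y = PFuzzSplitStrCommon_altGo fuel X Y := by
  intro fuel
  induction fuel with
  | zero => intro X Y; rfl
  | succ f ih =>
    intro X Y
    by_cases h : X.toList = [] ∨ Y.toList = []
    · simp only [PFuzzSplitStrCommonGo, PFuzzSplitStrCommon_altGo, if_pos h]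
    · simp only [PFuzzSplitStrCommonGo, PFuzzSplitStrCommon_altGo, if_neg h, pv_main X Y]
      by_cases hc : (pvAltLcs X Y).toList = []
      · simp only [if_pos hc, if_neg (not_not_intro hc)]
      · simp only [if_neg hc, if_pos hc, ih]

-- ===== VERDICT (by name: the statement is the Claim_ definition above) =====
theorem PFuzzSplitStrCommon_spec : Claim_equal_PFuzzSplitStrCommon := by
  intro X Y _
  unfold Spec_PFuzzSplitStrCommon PFuzzSplitStrCommon PFuzzSplitStrCommon_alt
  exact pv_go _ X Y
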